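-- pv_equiv track=rewrite | github.com/olijzenga/CLM-Evaluation | clm/util.py | remove_prefix_ignoring_whitespaces
-- ===== SOURCE A (Python) =====
-- def remove_prefix_ignoring_whitespaces(prefix: str, subject: str) -> str:
--     prefix = prefix.replace(" ", "").replace("\t", "").replace("\n", "")
--     for i, c in enumerate(subject):
--         if len(prefix) == 0:
--             return subject[i:]
--
--         if c in " \t\n":
--             continue
--
--         if prefix[0] != c:
--             return subject
--
--         prefix = prefix[1:]
--
--     return ""
-- ===== SOURCE B (Python) =====
-- def remove_prefix_ignoring_whitespaces(prefix: str, subject: str) -> str: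
--     p = prefix.replace(" ", "").replace("\t", "").replace("\n", "")
--     content = [(i, c) for i, c in enumerate(subject) if c not in " \t\n"]
--     for (i, c), q in zip(content, p):
--         if c != q:
--             return subject
--     if len(p) == 0:
--         return subject
--     if len(content) >= len(p):
--         return subject[content[len(p) - 1][0] + 1:]
--     return ""
-- ===== Notes on version B (the rewrite author's own statement) =====
-- stated objective: alternative
-- what changed: A's single interleaved scan with inline returns is replaced by a build-then-compare decomposition: first build an index of (position, char) pairs for the non-whitespace subject characters, then one zip comparison against the stripped prefix and a closed-form slice for the remainder.
import Mathlib
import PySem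

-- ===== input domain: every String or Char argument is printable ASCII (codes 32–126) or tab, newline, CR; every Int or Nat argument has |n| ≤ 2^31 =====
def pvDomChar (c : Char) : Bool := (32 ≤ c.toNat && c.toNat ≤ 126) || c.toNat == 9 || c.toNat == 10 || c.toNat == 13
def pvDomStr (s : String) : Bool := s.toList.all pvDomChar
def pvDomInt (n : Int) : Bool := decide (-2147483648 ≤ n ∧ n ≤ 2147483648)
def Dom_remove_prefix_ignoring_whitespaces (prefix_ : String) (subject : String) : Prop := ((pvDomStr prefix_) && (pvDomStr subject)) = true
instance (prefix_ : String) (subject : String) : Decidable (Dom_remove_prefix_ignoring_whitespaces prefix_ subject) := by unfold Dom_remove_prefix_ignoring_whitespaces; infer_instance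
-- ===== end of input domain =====

-- B replaces A's interleaved scan-with-inline-returns by a build-index-then-compare decomposition (objective: alternative, same cost).

def pvWs (c : Char) : Bool := c = ' ' || c = '\t' || c = '\n'

def pvStrip (s : String) : List Char :=
  (PySem.Str.replace (PySem.Str.replace (PySem.Str.replace s " " "") "\t" "") "\n" "").toList

-- ===== PORT A =====
-- the for-loop over enumerate(subject): i is the running index, third arg the remaining chars
def pvALoop (s : String) : List Char → Nat → List Char → String
  | _, _, [] => ""
  | [], i, _ :: _ => String.ofList (s.toList.drop i)      -- subject[i:]
  | q :: qs, i, c :: rest =>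
    if pvWs c then pvALoop s (q :: qs) (i + 1) rest
    else if q ≠ c then s
    else pvALoop s qs (i + 1) rest

def remove_prefix_ignoring_whitespaces (prefix_ : String) (subject : String) : String :=
  pvALoop subject (pvStrip prefix_) 0 subject.toList

-- ===== PORT B =====
-- content = [(i, c) for i, c in enumerate(subject) if c not in " \t\n"]
def pvEnum : Nat → List Char → List (Nat × Char)
  | _, [] => []
  | i, c :: cs => (i, c) :: pvEnum (i + 1) cs

-- the zip(content, p) comparison loop: false = mismatch found ("return subject")
def pvCmp : List Char → List (Nat × Char) → Bool
  | q :: qs, ic :: rest => if ic.2 ≠ q then false else pvCmp qs rest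
  | _, _ => true

def remove_prefix_ignoring_whitespaces_alt (prefix_ : String) (subject : String) : String :=
  let p := pvStrip prefix_
  let content := (pvEnum 0 subject.toList).filter (fun ic => !pvWs ic.2)
  if pvCmp p content = false then subject
  else if p = [] then subject
  else if p.length ≤ content.length then
    String.ofList (subject.toList.drop ((content.getD (p.length - 1) (0, ' ')).1 + 1))   -- subject[content[len(p)-1][0]+1:]
  else ""

-- ===== PRECONDITION & SPEC =====
def Spec_remove_prefix_ignoring_whitespaces (prefix_ : String) (subject : String) (out : String) : Prop := out = remove_prefix_ignoring_whitespaces_alt prefix_ subject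
instance (prefix_ : String) (subject : String) (out : String) : Decidable (Spec_remove_prefix_ignoring_whitespaces prefix_ subject out) := by unfold Spec_remove_prefix_ignoring_whitespaces; infer_instance

-- ===== CLAIM (what is proved, stated in full; the proofs are below) =====
def Claim_equal_remove_prefix_ignoring_whitespaces : Prop := ∀ (prefix_ : String) (subject : String), Dom_remove_prefix_ignoring_whitespaces prefix_ subject → Spec_remove_prefix_ignoring_whitespaces prefix_ subject (remove_prefix_ignoring_whitespaces prefix_ subject)

-- ===== LEMMAS AND PROOFS =====

-- proof-side mirror of B's tail (for a nonempty stripped prefix)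
def pvCore (s : String) (p : List Char) (content : List (Nat × Char)) : String :=
  if pvCmp p content = false then s
  else if p.length ≤ content.length then
    String.ofList (s.toList.drop ((content.getD (p.length - 1) (0, ' ')).1 + 1))
  else ""

theorem pvALoop_nil (s : String) (i : Nat) (rest : List Char)
    (h : rest = s.toList.drop i) :
    pvALoop s [] i rest = String.ofList (s.toList.drop i) := by
  cases rest with
  | nil => simp [pvALoop, ← h]
  | cons c r => simp [pvALoop]

theorem pvCore_cons (s : String) (i : Nat) (q q' : Char) (qs' : List Char)
    (fr : List (Nat × Char)) :
    pvCore s (q :: q' :: qs') ((i, q) :: fr) = pvCore s (q' :: qs') fr := by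
  unfold pvCore
  have hcmp : pvCmp (q :: q' :: qs') ((i, q) :: fr) = pvCmp (q' :: qs') fr := by
    simp [pvCmp]
  have hidx : ((i, q) :: fr).getD ((q :: q' :: qs').length - 1) (0, ' ')
      = fr.getD ((q' :: qs').length - 1) (0, ' ') := by
    simp [List.length_cons]
  rw [hcmp, hidx]
  split_ifs with h1 h2 h3 h4 <;> first
    | rfl
    | (simp only [List.length_cons] at *; omega)

theorem pvALoop_eq_core (s : String) :
    ∀ (rest : List Char) (i : Nat) (q : Char) (qs : List Char),
      rest = s.toList.drop i →
      pvALoop s (q :: qs) i rest =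
        pvCore s (q :: qs) ((pvEnum i rest).filter (fun ic => !pvWs ic.2)) := by
  intro rest
  induction rest with
  | nil =>
    intro i q qs _
    simp [pvALoop, pvEnum, pvCore, pvCmp]
  | cons c r ih =>
    intro i q qs h
    have hr : r = s.toList.drop (i + 1) := by
      have : s.toList.drop (i + 1) = (s.toList.drop i).drop 1 := by
        rw [List.drop_drop]
      rw [this, ← h]
      simp
    by_cases hws : pvWs c
    · simp [pvALoop, hws, pvEnum, ih (i + 1) q qs hr]
    · by_cases hqc : q = c
      · subst hqc
        cases qs with
        | nil =>
          have := pvALoop_nil s (i + 1) r hr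
          simp [pvALoop, hws, pvEnum, pvCore, pvCmp, this]
        | cons q' qs' =>
          have hih := ih (i + 1) q' qs' hr
          have hstep : pvALoop s (q :: q' :: qs') i (q :: r)
              = pvALoop s (q' :: qs') (i + 1) r := by
            simp [pvALoop, hws]
          rw [hstep, hih]
          simp only [pvEnum, List.filter_cons, hws, Bool.not_false, if_pos]
          rw [pvCore_cons]
      · simp [pvALoop, hws, hqc, pvEnum, pvCore, pvCmp, Ne.symm hqc]

-- ===== VERDICT (by name: the statement is the Claim_ definition above) =====
theorem remove_prefix_ignoring_whitespaces_spec : Claim_equal_remove_prefix_ignoring_whitespaces := by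
  intro prefix_ subject _
  unfold Spec_remove_prefix_ignoring_whitespaces
  unfold remove_prefix_ignoring_whitespaces remove_prefix_ignoring_whitespaces_alt
  cases hp : pvStrip prefix_ with
  | nil =>
    have h0 : subject.toList = subject.toList.drop 0 := by simp
    rw [pvALoop_nil subject 0 subject.toList h0]
    simp [pvCmp]
  | cons q qs =>
    have h0 : subject.toList = subject.toList.drop 0 := by simp
    rw [pvALoop_eq_core subject subject.toList 0 q qs h0]
    simp [pvCore]
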